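-- pv_equiv track=rewrite | github.com/shoraj1551/SmartEducation | app/services/gamification_service.py | get_level_title
-- ===== SOURCE A (Python) =====
-- def get_level_title(level):
--     """RPG Titles based on level"""
--     titles = [
--         (1, "Novice"),
--         (5, "Apprentice"),
--         (10, "Scholar"),
--         (20, "Expert"),
--         (30, "Master"),
--         (40, "Grandmaster"),
--         (50, "Legend"),
--         (100, "God Tier")
--     ]
--     # Find highest title <= level
--     current_title = "Novice"
--     for thr, title in titles:
--         if level >= thr:
--             current_title = title
--         else:
--             break
--     return current_title
-- ===== SOURCE B (Python) =====
-- def get_level_title(level):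
--     """RPG Titles based on level"""
--     bounds = [1, 5, 10, 20, 30, 40, 50, 100]
--     titles = ["Novice", "Apprentice", "Scholar", "Expert",
--               "Master", "Grandmaster", "Legend", "God Tier"]
--     # binary search: number of thresholds <= level (bisect_right by hand)
--     lo, hi = 0, len(bounds)
--     while lo < hi:
--         mid = (lo + hi) // 2
--         if level < bounds[mid]:
--             hi = mid
--         else:
--             lo = mid + 1
--     i = lo - 1
--     return titles[i] if i >= 0 else "Novice"
-- ===== Notes on version B (the rewrite author's own statement) =====
-- stated objective: alternative
-- what changed: Replaced A's sequential scan-with-break over (threshold,title) pairs by a hand-written bisect_right binary search over a bounds list with a parallel titles list, indexing the parallel titles list at the found position, with levels below the first threshold mapped to the default 'Novice'.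
import Mathlib
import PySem

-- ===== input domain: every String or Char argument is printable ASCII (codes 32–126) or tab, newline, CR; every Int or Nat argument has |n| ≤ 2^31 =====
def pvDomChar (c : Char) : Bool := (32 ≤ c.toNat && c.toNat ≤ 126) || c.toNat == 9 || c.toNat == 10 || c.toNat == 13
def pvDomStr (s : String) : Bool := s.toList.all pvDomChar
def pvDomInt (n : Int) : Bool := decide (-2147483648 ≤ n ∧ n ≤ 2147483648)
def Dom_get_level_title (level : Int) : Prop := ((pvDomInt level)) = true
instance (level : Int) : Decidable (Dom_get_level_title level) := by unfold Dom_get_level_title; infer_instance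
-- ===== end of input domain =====

-- B replaces A's linear scan-with-break by a binary search (bisect_right) over a bounds list with a parallel titles list; same return values (levels below the first threshold give the default 'Novice').

-- ===== PORT A =====
def get_level_title.loop (level : Int) : List (Int × String) → String → String
  | [], cur => cur
  | (thr, title) :: rest, cur =>
    if level ≥ thr then get_level_title.loop level rest title
    else cur

def get_level_title (level : Int) : String :=
  let titles : List (Int × String) :=
    [(1, "Novice"), (5, "Apprentice"), (10, "Scholar"), (20, "Expert"),
     (30, "Master"), (40, "Grandmaster"), (50, "Legend"), (100, "God Tier")]
  get_level_title.loop level titles "Novice"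

-- ===== PORT B =====
-- hand-written bisect_right while-loop, ported as recursion on hi - lo
def get_level_title_alt.bisect (level : Int) (bounds : List Int) (lo hi : Nat) : Nat :=
  if h : lo < hi then
    let mid := (lo + hi) / 2
    if level < bounds.getD mid 0 then get_level_title_alt.bisect level bounds lo mid
    else get_level_title_alt.bisect level bounds (mid + 1) hi
  else lo
termination_by hi - lo
decreasing_by all_goals omega

def get_level_title_alt (level : Int) : String :=
  let bounds : List Int := [1, 5, 10, 20, 30, 40, 50, 100]
  let titles : List String := ["Novice", "Apprentice", "Scholar", "Expert",
      "Master", "Grandmaster", "Legend", "God Tier"]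
  let lo := get_level_title_alt.bisect level bounds 0 bounds.length
  if lo ≥ 1 then titles.getD (lo - 1) "" else "Novice"

-- ===== PRECONDITION & SPEC =====
def Spec_get_level_title (level : Int) (out : String) : Prop := out = get_level_title_alt level
instance (level : Int) (out : String) : Decidable (Spec_get_level_title level out) := by unfold Spec_get_level_title; infer_instance

-- ===== CLAIM (what is proved, stated in full; the proofs are below) =====
def Claim_equal_get_level_title : Prop := ∀ (level : Int), Dom_get_level_title level → Spec_get_level_title level (get_level_title level)

-- ===== LEMMAS AND PROOFS =====

-- ===== VERDICT (by name: the statement is the Claim_ definition above) =====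
theorem get_level_title_spec : Claim_equal_get_level_title := by
  intro level _
  show get_level_title level = get_level_title_alt level
  rcases lt_or_ge level 1 with h1 | h1
  case _ =>
    simp [get_level_title, get_level_title.loop, get_level_title_alt,
    get_level_title_alt.bisect, ge_iff_le,
    (show ¬ (1:Int) ≤ level by omega),
    (show level < (1:Int) by omega),
    (show ¬ (5:Int) ≤ level by omega),
    (show level < (5:Int) by omega),
    (show ¬ (10:Int) ≤ level by omega),
    (show level < (10:Int) by omega),
    (show ¬ (20:Int) ≤ level by omega),
    (show level < (20:Int) by omega),
    (show ¬ (30:Int) ≤ level by omega),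
    (show level < (30:Int) by omega),
    (show ¬ (40:Int) ≤ level by omega),
    (show level < (40:Int) by omega),
    (show ¬ (50:Int) ≤ level by omega),
    (show level < (50:Int) by omega),
    (show ¬ (100:Int) ≤ level by omega),
    (show level < (100:Int) by omega)]
  rcases lt_or_ge level 5 with h2 | h2
  case _ =>
    simp [get_level_title, get_level_title.loop, get_level_title_alt,
    get_level_title_alt.bisect, ge_iff_le,
    (show (1:Int) ≤ level by omega),
    (show ¬ level < (1:Int) by omega),
    (show ¬ (5:Int) ≤ level by omega),
    (show level < (5:Int) by omega),
    (show ¬ (10:Int) ≤ level by omega),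
    (show level < (10:Int) by omega),
    (show ¬ (20:Int) ≤ level by omega),
    (show level < (20:Int) by omega),
    (show ¬ (30:Int) ≤ level by omega),
    (show level < (30:Int) by omega),
    (show ¬ (40:Int) ≤ level by omega),
    (show level < (40:Int) by omega),
    (show ¬ (50:Int) ≤ level by omega),
    (show level < (50:Int) by omega),
    (show ¬ (100:Int) ≤ level by omega),
    (show level < (100:Int) by omega)]
  rcases lt_or_ge level 10 with h3 | h3
  case _ =>
    simp [get_level_title, get_level_title.loop, get_level_title_alt,
    get_level_title_alt.bisect, ge_iff_le,
    (show (1:Int) ≤ level by omega),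
    (show ¬ level < (1:Int) by omega),
    (show (5:Int) ≤ level by omega),
    (show ¬ level < (5:Int) by omega),
    (show ¬ (10:Int) ≤ level by omega),
    (show level < (10:Int) by omega),
    (show ¬ (20:Int) ≤ level by omega),
    (show level < (20:Int) by omega),
    (show ¬ (30:Int) ≤ level by omega),
    (show level < (30:Int) by omega),
    (show ¬ (40:Int) ≤ level by omega),
    (show level < (40:Int) by omega),
    (show ¬ (50:Int) ≤ level by omega),
    (show level < (50:Int) by omega),
    (show ¬ (100:Int) ≤ level by omega),
    (show level < (100:Int) by omega)]
  rcases lt_or_ge level 20 with h4 | h4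
  case _ =>
    simp [get_level_title, get_level_title.loop, get_level_title_alt,
    get_level_title_alt.bisect, ge_iff_le,
    (show (1:Int) ≤ level by omega),
    (show ¬ level < (1:Int) by omega),
    (show (5:Int) ≤ level by omega),
    (show ¬ level < (5:Int) by omega),
    (show (10:Int) ≤ level by omega),
    (show ¬ level < (10:Int) by omega),
    (show ¬ (20:Int) ≤ level by omega),
    (show level < (20:Int) by omega),
    (show ¬ (30:Int) ≤ level by omega),
    (show level < (30:Int) by omega),
    (show ¬ (40:Int) ≤ level by omega),
    (show level < (40:Int) by omega),
    (show ¬ (50:Int) ≤ level by omega),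
    (show level < (50:Int) by omega),
    (show ¬ (100:Int) ≤ level by omega),
    (show level < (100:Int) by omega)]
  rcases lt_or_ge level 30 with h5 | h5
  case _ =>
    simp [get_level_title, get_level_title.loop, get_level_title_alt,
    get_level_title_alt.bisect, ge_iff_le,
    (show (1:Int) ≤ level by omega),
    (show ¬ level < (1:Int) by omega),
    (show (5:Int) ≤ level by omega),
    (show ¬ level < (5:Int) by omega),
    (show (10:Int) ≤ level by omega),
    (show ¬ level < (10:Int) by omega),
    (show (20:Int) ≤ level by omega),
    (show ¬ level < (20:Int) by omega),
    (show ¬ (30:Int) ≤ level by omega),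
    (show level < (30:Int) by omega),
    (show ¬ (40:Int) ≤ level by omega),
    (show level < (40:Int) by omega),
    (show ¬ (50:Int) ≤ level by omega),
    (show level < (50:Int) by omega),
    (show ¬ (100:Int) ≤ level by omega),
    (show level < (100:Int) by omega)]
  rcases lt_or_ge level 40 with h6 | h6
  case _ =>
    simp [get_level_title, get_level_title.loop, get_level_title_alt,
    get_level_title_alt.bisect, ge_iff_le,
    (show (1:Int) ≤ level by omega),
    (show ¬ level < (1:Int) by omega),
    (show (5:Int) ≤ level by omega),
    (show ¬ level < (5:Int) by omega),
    (show (10:Int) ≤ level by omega),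
    (show ¬ level < (10:Int) by omega),
    (show (20:Int) ≤ level by omega),
    (show ¬ level < (20:Int) by omega),
    (show (30:Int) ≤ level by omega),
    (show ¬ level < (30:Int) by omega),
    (show ¬ (40:Int) ≤ level by omega),
    (show level < (40:Int) by omega),
    (show ¬ (50:Int) ≤ level by omega),
    (show level < (50:Int) by omega),
    (show ¬ (100:Int) ≤ level by omega),
    (show level < (100:Int) by omega)]
  rcases lt_or_ge level 50 with h7 | h7
  case _ =>
    simp [get_level_title, get_level_title.loop, get_level_title_alt,
    get_level_title_alt.bisect, ge_iff_le,
    (show (1:Int) ≤ level by omega),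
    (show ¬ level < (1:Int) by omega),
    (show (5:Int) ≤ level by omega),
    (show ¬ level < (5:Int) by omega),
    (show (10:Int) ≤ level by omega),
    (show ¬ level < (10:Int) by omega),
    (show (20:Int) ≤ level by omega),
    (show ¬ level < (20:Int) by omega),
    (show (30:Int) ≤ level by omega),
    (show ¬ level < (30:Int) by omega),
    (show (40:Int) ≤ level by omega),
    (show ¬ level < (40:Int) by omega),
    (show ¬ (50:Int) ≤ level by omega),
    (show level < (50:Int) by omega),
    (show ¬ (100:Int) ≤ level by omega),
    (show level < (100:Int) by omega)]
  rcases lt_or_ge level 100 with h8 | h8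
  case _ =>
    simp [get_level_title, get_level_title.loop, get_level_title_alt,
    get_level_title_alt.bisect, ge_iff_le,
    (show (1:Int) ≤ level by omega),
    (show ¬ level < (1:Int) by omega),
    (show (5:Int) ≤ level by omega),
    (show ¬ level < (5:Int) by omega),
    (show (10:Int) ≤ level by omega),
    (show ¬ level < (10:Int) by omega),
    (show (20:Int) ≤ level by omega),
    (show ¬ level < (20:Int) by omega),
    (show (30:Int) ≤ level by omega),
    (show ¬ level < (30:Int) by omega),
    (show (40:Int) ≤ level by omega),
    (show ¬ level < (40:Int) by omega),
    (show (50:Int) ≤ level by omega),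
    (show ¬ level < (50:Int) by omega),
    (show ¬ (100:Int) ≤ level by omega),
    (show level < (100:Int) by omega)]
  simp [get_level_title, get_level_title.loop, get_level_title_alt,
  get_level_title_alt.bisect, ge_iff_le,
  (show (1:Int) ≤ level by omega),
  (show ¬ level < (1:Int) by omega),
  (show (5:Int) ≤ level by omega),
  (show ¬ level < (5:Int) by omega),
  (show (10:Int) ≤ level by omega),
  (show ¬ level < (10:Int) by omega),
  (show (20:Int) ≤ level by omega),
  (show ¬ level < (20:Int) by omega),
  (show (30:Int) ≤ level by omega),
  (show ¬ level < (30:Int) by omega),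
  (show (40:Int) ≤ level by omega),
  (show ¬ level < (40:Int) by omega),
  (show (50:Int) ≤ level by omega),
  (show ¬ level < (50:Int) by omega),
  (show (100:Int) ≤ level by omega),
  (show ¬ level < (100:Int) by omega)]
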